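-- pv_equiv track=rewrite | github.com/alexguadagnin/Agentic-MultiDB-RAG-on-Global-News | src/Hybrid_RAG/data_ingestion/process_local_missing.py | remove_overlap
-- ===== SOURCE A (Python) =====
-- def remove_overlap(text: str) -> str:
--     if len(text) < 2: return text
--     max_check_len = len(text) // 2
--     max_overlap_len = 0
--     for i in range(1, max_check_len + 1):
--         if text[:i] == text[-i:]: max_overlap_len = i
--     if max_overlap_len > 0: return text[max_overlap_len:]
--     return text
-- ===== SOURCE B (Python) =====
-- def remove_overlap(text: str) -> str:
--     # KMP: compute the prefix function in one linear pass, then walk the border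
--     # chain down from the longest border to the largest border <= len(text)//2.
--     n = len(text)
--     if n < 2:
--         return text
--     pi = [0] * n
--     k = 0
--     for i in range(1, n):
--         while k > 0 and text[i] != text[k]:
--             k = pi[k - 1]
--         if text[i] == text[k]:
--             k += 1
--         pi[i] = k
--     b = pi[n - 1]
--     half = n // 2
--     while b > half:
--         b = pi[b - 1]
--     return text[b:] if b > 0 else text
-- ===== Notes on version B (the rewrite author's own statement) =====
-- stated objective: faster
-- what changed: B computes the KMP prefix function in one linear pass and walks the border chain down to the largest border <= n//2, instead of A's loop that slices and compares prefix/suffix pairs for every candidate length.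
import Mathlib
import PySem

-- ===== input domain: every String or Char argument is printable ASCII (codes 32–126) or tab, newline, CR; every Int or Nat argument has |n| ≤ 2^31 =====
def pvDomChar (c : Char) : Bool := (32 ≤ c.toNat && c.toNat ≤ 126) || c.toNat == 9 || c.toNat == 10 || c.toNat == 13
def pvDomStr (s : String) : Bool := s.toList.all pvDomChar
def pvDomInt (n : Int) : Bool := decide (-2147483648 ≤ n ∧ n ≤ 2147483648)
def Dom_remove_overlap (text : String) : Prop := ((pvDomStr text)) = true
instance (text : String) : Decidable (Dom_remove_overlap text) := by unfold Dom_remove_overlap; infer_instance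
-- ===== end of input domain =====

-- B replaces A's quadratic prefix/suffix slice-comparison scan by the linear KMP prefix
-- function plus a border-chain walk down to the largest border <= n//2; objective: faster.


-- ===== PORT A =====
def remove_overlap (text : String) : String :=
  if PySem.Str.len text < 2 then text
  else
    let max_check_len := PySem.Int.floordiv (PySem.Str.len text) 2
    let max_overlap_len :=
      (PySem.List.pyRange 1 (max_check_len + 1)).foldl
        (fun acc i =>
          if PySem.Str.slice text none (some i) = PySem.Str.slice text (some (-i)) none then i
          else acc) 0
    if max_overlap_len > 0 then PySem.Str.slice text (some max_overlap_len) none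
    else text

-- ===== PORT B =====
-- Source B's inner `while k > 0 and text[i] != text[k]: k = pi[k-1]`.  All indices are
-- provably in range (k ≤ i-1 < n), so getD's default is never read; the fuel k+1 is
-- provably enough because each step strictly decreases k (pi[k-1] ≤ k-1, proved below).
def kmpIn (s : List Char) (pi : List Nat) (ci : Char) : Nat → Nat → Nat
  | 0, k => k
  | f + 1, k =>
    if 0 < k ∧ ¬ s.getD k ' ' = ci then kmpIn s pi ci f (pi.getD (k - 1) 0) else k

-- Source B's `for i in range(1, n)` loop body: pi starts as [0] and each iteration appends
-- pi[i] = k (the preallocated-list assignment written as an append; only indices < i are read).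
def kmpOut (s : List Char) : Nat → List Nat → Nat → List Nat
  | 0, pi, _ => pi
  | r + 1, pi, k =>
    let i := pi.length
    let k1 := kmpIn s pi (s.getD i ' ') (k + 1) k
    let k2 := if s.getD i ' ' = s.getD k1 ' ' then k1 + 1 else k1
    kmpOut s r (pi ++ [k2]) k2

-- Source B's `while b > half: b = pi[b-1]`; fuel b+1 suffices since b strictly decreases.
def kmpWalk (pi : List Nat) (t : Nat) : Nat → Nat → Nat
  | 0, b => b
  | f + 1, b => if t < b then kmpWalk pi t f (pi.getD (b - 1) 0) else b

def remove_overlap_alt (text : String) : String :=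
  let l := text.toList
  let n := l.length
  if n < 2 then text
  else
    let pi := kmpOut l (n - 1) [0] 0
    let b0 := pi.getD (n - 1) 0
    let b := kmpWalk pi (n / 2) (b0 + 1) b0
    if 0 < b then PySem.Str.slice text (some (b : Int)) none else text

-- ===== PRECONDITION & SPEC =====
def Spec_remove_overlap (text : String) (out : String) : Prop := out = remove_overlap_alt text
instance (text : String) (out : String) : Decidable (Spec_remove_overlap text out) := by unfold Spec_remove_overlap; infer_instance

-- ===== CLAIM (what is proved, stated in full; the proofs are below) =====
def Claim_equal_remove_overlap : Prop := ∀ (text : String), Dom_remove_overlap text → Spec_remove_overlap text (remove_overlap text)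

-- ===== LEMMAS AND PROOFS =====

-- largest i in [1..k] with take i = suffix of length i (0 if none)
def pvBest (l : List Char) : Nat → Nat
  | 0 => 0
  | k + 1 => if l.take (k + 1) = l.drop (l.length - (k + 1)) then k + 1 else pvBest l k

-- k is a border of l: the length-k prefix equals the length-k suffix
def Bord (l : List Char) (k : Nat) : Prop :=
  k ≤ l.length ∧ l.take k = l.drop (l.length - k)

-- longest PROPER border of a (nonempty) list
def maxb (m : List Char) : Nat := pvBest m (m.length - 1)

-- pi is correct on all filled entries: pi[i] = longest proper border of l[:i+1]
def Good (l : List Char) (pi : List Nat) : Prop :=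
  pi.length ≤ l.length ∧ ∀ i, i < pi.length → pi.getD i 0 = maxb (l.take (i + 1))

-- A's test at i = k+1 is the take/drop equation
lemma condA_iff (text : String) (k : Nat) :
    (PySem.Str.slice text none (some ((k + 1 : Nat) : Int)) =
      PySem.Str.slice text (some (-((k + 1 : Nat) : Int))) none) ↔
    (text.toList.take (k + 1) = text.toList.drop (text.toList.length - (k + 1))) := by
  rw [String.ext_iff, PySem.Str.toList_slice, PySem.Str.toList_slice,
    PySem.Chars.slice_eq_listSlice, PySem.Chars.slice_eq_listSlice,
    PySem.List.slice_to_natCast, PySem.List.slice_from_neg_natCast _ _ (Nat.succ_pos k)]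

lemma foldA (text : String) (k : Nat) :
    (PySem.List.pyRange 1 ((k : Int) + 1)).foldl
      (fun acc i =>
        if PySem.Str.slice text none (some i) = PySem.Str.slice text (some (-i)) none then i
        else acc) 0 = ((pvBest text.toList k : Nat) : Int) := by
  induction k with
  | zero => norm_num [PySem.List.pyRange, pvBest]
  | succ k ih =>
    have h1 : ((k + 1 : Nat) : Int) + 1 = ((k : Int) + 1) + 1 := by push_cast; ring
    have h2 : (1 : Int) ≤ (k : Int) + 1 := by omega
    rw [h1, PySem.List.pyRange_one_succ_right h2, List.foldl_append, ih]
    show (if PySem.Str.slice text none (some ((k : Int) + 1)) =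
        PySem.Str.slice text (some (-((k : Int) + 1))) none then (k : Int) + 1
      else ((pvBest text.toList k : Nat) : Int)) = _
    have hcast : ((k : Int) + 1) = ((k + 1 : Nat) : Int) := by push_cast; ring
    rw [hcast]
    unfold pvBest
    by_cases hc : text.toList.take (k + 1) = text.toList.drop (text.toList.length - (k + 1))
    · rw [if_pos ((condA_iff text k).2 hc), if_pos hc]
    · rw [if_neg (by rw [condA_iff text k]; exact hc), if_neg hc]
      cases k <;> rfl

-- pvBest basics
lemma pvBest_le (l : List Char) (k : Nat) : pvBest l k ≤ k := by
  induction k with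
  | zero => simp [pvBest]
  | succ k ih => unfold pvBest; split_ifs <;> omega

lemma pvBest_eq (l : List Char) (k : Nat) :
    l.take (pvBest l k) = l.drop (l.length - pvBest l k) := by
  induction k with
  | zero => simp [pvBest]
  | succ k ih =>
    unfold pvBest
    split_ifs with h
    · exact h
    · exact ih

lemma le_pvBest (l : List Char) (j k : Nat) (hj : j ≤ k)
    (h : l.take j = l.drop (l.length - j)) : j ≤ pvBest l k := by
  induction k with
  | zero => omega
  | succ k ih =>
    unfold pvBest
    split_ifs with hc
    · omega
    · rcases Nat.lt_or_ge j (k + 1) with hlt | hge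
      · exact ih (by omega)
      · have hj1 : j = k + 1 := by omega
        subst hj1
        exact absurd h hc

-- Bord basics
lemma bord_zero (l : List Char) : Bord l 0 := by
  constructor
  · exact Nat.zero_le _
  · simp

lemma bord_nest (l : List Char) (j k : Nat) (hjk : j ≤ k)
    (hj : Bord l j) (hk : Bord l k) : Bord (l.take k) j := by
  obtain ⟨hj1, hj2⟩ := hj
  obtain ⟨hk1, hk2⟩ := hk
  constructor
  · simpa [List.length_take] using Nat.le_min.2 ⟨hjk, hj1⟩
  · rw [List.take_take, Nat.min_eq_left hjk, List.length_take, Nat.min_eq_left hk1]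
    rw [hk2, List.drop_drop]
    rw [show l.length - k + (k - j) = l.length - j from by omega]
    exact hj2

lemma bord_comp (l : List Char) (j k : Nat)
    (hk : Bord l k) (hj : Bord (l.take k) j) : Bord l j := by
  obtain ⟨hk1, hk2⟩ := hk
  obtain ⟨hj1, hj2⟩ := hj
  rw [List.length_take, Nat.min_eq_left hk1] at hj1 hj2
  rw [List.take_take, Nat.min_eq_left hj1, hk2, List.drop_drop] at hj2
  rw [show l.length - k + (k - j) = l.length - j from by omega] at hj2
  exact ⟨by omega, hj2⟩

lemma bord_ext (l : List Char) (i j : Nat) (hi : i < l.length) (hj : j ≤ i) :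
    Bord (l.take (i + 1)) (j + 1) ↔
      Bord (l.take i) j ∧ l.getD i ' ' = l.getD j ' ' := by
  have hj' : j < l.length := by omega
  have hlen1 : (l.take (i + 1)).length = i + 1 := List.length_take_of_le (by omega)
  have hleni : (l.take i).length = i := List.length_take_of_le (by omega)
  have hsplit : l.take (i + 1) = l.take i ++ [l.getD i ' '] := by
    rw [List.getD_eq_getElem l ' ' hi]
    exact List.take_succ_eq_append_getElem hi
  have hto : (l.take (i + 1)).take (j + 1) = l.take j ++ [l.getD j ' '] := by
    rw [List.take_take, Nat.min_eq_left (by omega : j + 1 ≤ i + 1),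
      List.getD_eq_getElem l ' ' hj', List.take_succ_eq_append_getElem hj']
  have hdr : (l.take (i + 1)).drop (i + 1 - (j + 1)) =
      (l.take i).drop (i - j) ++ [l.getD i ' '] := by
    rw [show i + 1 - (j + 1) = i - j from by omega, hsplit,
      List.drop_append_of_le_length (by rw [hleni]; omega)]
  have hlens : (l.take j).length = ((l.take i).drop (i - j)).length := by
    rw [List.length_drop, List.length_take, List.length_take]
    omega
  constructor
  · rintro ⟨_, h2⟩
    rw [hlen1, hto, hdr] at h2
    obtain ⟨hA, hB⟩ := List.append_inj h2 hlens
    refine ⟨⟨by rw [hleni]; omega, ?_⟩, ?_⟩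
    · rw [hleni, List.take_take, Nat.min_eq_left hj]
      exact hA
    · simpa using hB.symm
  · rintro ⟨⟨_, h2⟩, hc⟩
    refine ⟨by rw [hlen1]; omega, ?_⟩
    rw [hlen1, hto, hdr, hc]
    congr 1
    rw [hleni, List.take_take, Nat.min_eq_left hj] at h2
    exact h2

-- maxb basics
lemma maxb_bord (m : List Char) : Bord m (maxb m) :=
  ⟨le_trans (le_trans (pvBest_le m _) (Nat.sub_le _ _)) le_rfl, pvBest_eq m _⟩

lemma maxb_lt (m : List Char) (h : m ≠ []) : maxb m < m.length := by
  have := pvBest_le m (m.length - 1)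
  have : maxb m ≤ m.length - 1 := this
  have hpos : 0 < m.length := List.length_pos_of_ne_nil h
  omega

lemma le_maxb (m : List Char) (j : Nat) (h : Bord m j) (hlt : j < m.length) : j ≤ maxb m :=
  le_pvBest m j (m.length - 1) (by omega) h.2

-- the chain walk returns the greatest border of l that is ≤ t
lemma walk_spec (l : List Char) (pi : List Nat) (t : Nat)
    (hg : Good l pi) (hlen : pi.length = l.length) :
    ∀ fuel b, b ≤ fuel → b < l.length → Bord l b →
      (∀ j, Bord l j → j ≤ t → j < l.length → j ≤ b) →
      Bord l (kmpWalk pi t fuel b) ∧ kmpWalk pi t fuel b ≤ t ∧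
        (∀ j, Bord l j → j ≤ t → j < l.length → j ≤ kmpWalk pi t fuel b) := by
  intro fuel
  induction fuel with
  | zero =>
    intro b hb _ hbord hmax
    have hb0 : b = 0 := by omega
    subst hb0
    simp only [kmpWalk]
    exact ⟨hbord, Nat.zero_le _, hmax⟩
  | succ f ih =>
    intro b hb hblt hbord hmax
    unfold kmpWalk
    split_ifs with ht
    · have hb1 : 1 ≤ b := by omega
      have hidx : b - 1 < pi.length := by omega
      have hpi : pi.getD (b - 1) 0 = maxb (l.take b) := by
        have := hg.2 (b - 1) hidx
        rwa [Nat.sub_add_cancel hb1] at this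
      set b' := pi.getD (b - 1) 0 with hb'
      have htklen : (l.take b).length = b := List.length_take_of_le (by omega)
      have htkne : l.take b ≠ [] := by
        intro hcon
        have := congrArg List.length hcon
        simp [htklen] at this
        omega
      have hb'lt : b' < b := by
        have := maxb_lt (l.take b) htkne
        rw [htklen] at this
        omega
      have hbordb' : Bord l b' := by
        apply bord_comp l b' b hbord
        rw [hpi]
        exact maxb_bord _
      refine ih b' (by omega) (by omega) hbordb' ?_
      intro j hj hjt hjlt
      have hjb : j ≤ b := hmax j hj hjt hjlt
      have hjb' : j < b := by omega
      have : Bord (l.take b) j := bord_nest l j b (by omega) hj hbord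
      have := le_maxb (l.take b) j this (by rw [htklen]; omega)
      rw [hpi]
      omega
    · exact ⟨hbord, by omega, hmax⟩

-- the inner while loop returns the greatest border k' of l[:i] with l[k'] = ci (or 0)
lemma kmpIn_spec (l : List Char) (pi : List Nat) (ci : Char) (i : Nat)
    (hg : Good l pi) (hlen : pi.length = i) (hi : i ≤ l.length) :
    ∀ fuel k, k ≤ fuel → k < i → Bord (l.take i) k →
      (∀ j, Bord (l.take i) j → j < i → l.getD j ' ' = ci → j ≤ k) →
      Bord (l.take i) (kmpIn l pi ci fuel k) ∧ kmpIn l pi ci fuel k < i ∧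
        (kmpIn l pi ci fuel k = 0 ∨ l.getD (kmpIn l pi ci fuel k) ' ' = ci) ∧
        (∀ j, Bord (l.take i) j → j < i → l.getD j ' ' = ci → j ≤ kmpIn l pi ci fuel k) := by
  intro fuel
  induction fuel with
  | zero =>
    intro k hk hki hbord hmax
    have hk0 : k = 0 := by omega
    subst hk0
    simp only [kmpIn]
    exact ⟨hbord, hki, Or.inl trivial, hmax⟩
  | succ f ih =>
    intro k hk hki hbord hmax
    unfold kmpIn
    split_ifs with hc
    · obtain ⟨hkpos, hne⟩ := hc
      have hidx : k - 1 < pi.length := by omega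
      have hpi : pi.getD (k - 1) 0 = maxb (l.take k) := by
        have h2 := hg.2 (k - 1) hidx
        rwa [Nat.sub_add_cancel hkpos] at h2
      set k' := pi.getD (k - 1) 0 with hk'
      have htkk : l.take k = (l.take i).take k := by
        rw [List.take_take, Nat.min_eq_left (by omega)]
      have htklen : (l.take k).length = k := List.length_take_of_le (by omega)
      have htkne : l.take k ≠ [] := by
        intro hcon
        have := congrArg List.length hcon
        simp [htklen] at this
        omega
      have hk'lt : k' < k := by
        have := maxb_lt (l.take k) htkne
        rw [htklen] at this
        omega
      have hbordk' : Bord (l.take i) k' := by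
        apply bord_comp (l.take i) k' k hbord
        rw [← htkk, hpi]
        exact maxb_bord _
      refine ih k' (by omega) (by omega) hbordk' ?_
      intro j hj hji hjc
      have hjk : j ≤ k := hmax j hj hji hjc
      have hjk' : j < k := by
        rcases Nat.lt_or_ge j k with h | h
        · exact h
        · exfalso
          have : j = k := by omega
          rw [this] at hjc
          exact hne hjc
      have hjb : Bord (l.take k) j := by
        rw [htkk]
        exact bord_nest (l.take i) j k (by omega) hj hbord
      have := le_maxb (l.take k) j hjb (by rw [htklen]; omega)
      rw [hpi]
      omega
    · rcases Nat.eq_zero_or_pos k with h0 | hpos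
      · exact ⟨hbord, hki, Or.inl h0, hmax⟩
      · have hc' : l.getD k ' ' = ci := by
          by_contra hcc
          exact hc ⟨hpos, hcc⟩
        exact ⟨hbord, hki, Or.inr hc', hmax⟩

-- one outer-loop iteration computes maxb of the next prefix
lemma kmpStep (l : List Char) (pi : List Nat) (i : Nat)
    (hg : Good l pi) (hlen : pi.length = i) (hi1 : 1 ≤ i) (hi : i < l.length) :
    (if l.getD i ' ' = l.getD (kmpIn l pi (l.getD i ' ') (maxb (l.take i) + 1) (maxb (l.take i))) ' '
      then kmpIn l pi (l.getD i ' ') (maxb (l.take i) + 1) (maxb (l.take i)) + 1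
      else kmpIn l pi (l.getD i ' ') (maxb (l.take i) + 1) (maxb (l.take i)))
      = maxb (l.take (i + 1)) := by
  have htklen : (l.take i).length = i := List.length_take_of_le (by omega)
  have htkne : l.take i ≠ [] := by
    intro hcon
    have := congrArg List.length hcon
    simp [htklen] at this
    omega
  have hm_lt : maxb (l.take i) < i := by
    have := maxb_lt (l.take i) htkne
    rwa [htklen] at this
  have hm_bord : Bord (l.take i) (maxb (l.take i)) := maxb_bord _
  have hmax0 : ∀ j, Bord (l.take i) j → j < i → l.getD j ' ' = l.getD i ' ' → j ≤ maxb (l.take i) := by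
    intro j hj hji _
    exact le_maxb (l.take i) j hj (by rw [htklen]; omega)
  obtain ⟨hrb, hrlt, hrc, hrmax⟩ :=
    kmpIn_spec l pi (l.getD i ' ') i hg hlen (by omega) (maxb (l.take i) + 1) (maxb (l.take i))
      (by omega) hm_lt hm_bord hmax0
  set r := kmpIn l pi (l.getD i ' ') (maxb (l.take i) + 1) (maxb (l.take i)) with hr
  have hlen1 : (l.take (i + 1)).length = i + 1 := List.length_take_of_le (by omega)
  have htkne1 : l.take (i + 1) ≠ [] := by
    intro hcon
    have := congrArg List.length hcon
    simp [hlen1] at this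
  -- the candidate value
  set v := (if l.getD i ' ' = l.getD r ' ' then r + 1 else r) with hv
  have hvbord : Bord (l.take (i + 1)) v := by
    rw [hv]
    split_ifs with hcc
    · exact (bord_ext l i r hi (by omega)).2 ⟨hrb, hcc⟩
    · have hr0 : r = 0 := by
        rcases hrc with h | h
        · exact h
        · exact absurd h.symm hcc
      rw [hr0]
      exact bord_zero _
  have hvlt : v < i + 1 := by
    rw [hv]; split_ifs <;> omega
  have hvmax : ∀ m, Bord (l.take (i + 1)) m → m < i + 1 → m ≤ v := by
    intro m hm hmlt
    rcases Nat.eq_zero_or_pos m with h0 | hpos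
    · omega
    · obtain ⟨j, rfl⟩ : ∃ j, m = j + 1 := ⟨m - 1, by omega⟩
      obtain ⟨hjb, hjc⟩ := (bord_ext l i j hi (by omega)).1 hm
      have hjr : j ≤ r := hrmax j hjb (by omega) hjc.symm
      rw [hv]
      split_ifs with hcc
      · omega
      · exfalso
        have hr0 : r = 0 := by
          rcases hrc with h | h
          · exact h
          · exact absurd h.symm hcc
        have hj0 : j = 0 := by omega
        rw [hj0] at hjc
        rw [hr0] at hcc
        exact hcc hjc
  have h1 : v ≤ maxb (l.take (i + 1)) := le_maxb _ v hvbord (by rw [hlen1]; omega)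
  have h2 : maxb (l.take (i + 1)) ≤ v := by
    apply hvmax
    · exact maxb_bord _
    · have := maxb_lt (l.take (i + 1)) htkne1
      rwa [hlen1] at this
  omega

-- the outer loop keeps pi correct and carries the last entry in k
lemma kmpOut_spec (l : List Char) :
    ∀ r pi k, Good l pi → pi.length + r = l.length → 1 ≤ pi.length →
      pi.getD (pi.length - 1) 0 = k →
      Good l (kmpOut l r pi k) ∧ (kmpOut l r pi k).length = l.length := by
  intro r
  induction r with
  | zero =>
    intro pi k hg hlen _ _
    simp only [kmpOut]
    exact ⟨hg, by omega⟩
  | succ r ih =>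
    intro pi k hg hlen h1 hlast
    unfold kmpOut
    have hi : pi.length < l.length := by omega
    have hk : k = maxb (l.take pi.length) := by
      rw [← hlast]
      have := hg.2 (pi.length - 1) (by omega)
      rwa [Nat.sub_add_cancel h1] at this
    have hstep := kmpStep l pi pi.length hg rfl h1 hi
    rw [← hk] at hstep
    set k2 := (if l.getD pi.length ' ' = l.getD (kmpIn l pi (l.getD pi.length ' ') (k + 1) k) ' '
      then kmpIn l pi (l.getD pi.length ' ') (k + 1) k + 1
      else kmpIn l pi (l.getD pi.length ' ') (k + 1) k) with hk2
    have hgood' : Good l (pi ++ [k2]) := by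
      constructor
      · simp
        omega
      · intro j hj
        simp at hj
        rcases Nat.lt_or_ge j pi.length with hjlt | hjge
        · rw [List.getD_append _ _ _ _ hjlt]
          exact hg.2 j hjlt
        · have hje : j = pi.length := by omega
          subst hje
          have hgd : (pi ++ [k2]).getD pi.length 0 = k2 := by
            simp [List.getD_eq_getElem?_getD]
          rw [hgd]
          exact hstep
    have := ih (pi ++ [k2]) k2 hgood'
      (by simp only [List.length_append, List.length_cons, List.length_nil]; omega)
      (by simp only [List.length_append, List.length_cons, List.length_nil]; omega)
      (by simp [List.getD_eq_getElem?_getD])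
    exact this

-- ===== VERDICT (by name: the statement is the Claim_ definition above) =====
theorem remove_overlap_spec : Claim_equal_remove_overlap := by
  intro text _
  unfold Spec_remove_overlap remove_overlap remove_overlap_alt
  rw [PySem.Str.len_eq]
  set l := text.toList with hl
  set n := l.length with hn
  by_cases hsmall : n < 2
  · have h2 : (n : Int) < 2 := by exact_mod_cast hsmall
    rw [if_pos h2, if_pos hsmall]
  · have hge : ¬ ((n : Int) < 2) := by exact_mod_cast hsmall
    rw [if_neg hge, if_neg hsmall]
    have hn2 : 2 ≤ n := by omega
    -- B side: kmpOut produces the correct prefix function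
    have hg0 : Good l [0] := by
      constructor
      · simp only [List.length_cons, List.length_nil]
        omega
      · intro i hi
        simp only [List.length_cons, List.length_nil] at hi
        have hi0 : i = 0 := by omega
        subst hi0
        have h1 : (l.take 1).length = 1 := List.length_take_of_le (by omega)
        simp [maxb, h1, pvBest]
    obtain ⟨hgood, hlenpi⟩ := kmpOut_spec l (n - 1) [0] 0 hg0
      (by simp only [List.length_cons, List.length_nil]; omega)
      (by simp only [List.length_cons, List.length_nil]; omega)
      (by simp)
    set pi := kmpOut l (n - 1) [0] 0 with hpi
    have hne : l ≠ [] := by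
      intro hcon
      rw [hcon] at hn
      simp at hn
      omega
    have htake : l.take n = l := List.take_of_length_le (by omega)
    have hb0 : pi.getD (n - 1) 0 = maxb l := by
      have := hgood.2 (n - 1) (by omega)
      rwa [Nat.sub_add_cancel (by omega), htake] at this
    set b0 := pi.getD (n - 1) 0 with hb0'
    have hb0lt : b0 < n := by rw [hb0]; exact maxb_lt l hne
    have hb0bord : Bord l b0 := by rw [hb0]; exact maxb_bord l
    have hb0max : ∀ j, Bord l j → j ≤ n / 2 → j < n → j ≤ b0 := by
      intro j hj _ hjlt
      rw [hb0]
      exact le_maxb l j hj hjlt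
    obtain ⟨hwb, hwle, hwmax⟩ := walk_spec l pi (n / 2) hgood hlenpi (b0 + 1) b0
      (by omega) hb0lt hb0bord hb0max
    set w := kmpWalk pi (n / 2) (b0 + 1) b0 with hw
    -- w = pvBest l (n/2)
    have hweq : w = pvBest l (n / 2) := by
      have h1 : w ≤ pvBest l (n / 2) := le_pvBest l w (n / 2) hwle hwb.2
      have h2 : pvBest l (n / 2) ≤ w := by
        apply hwmax
        · exact ⟨by have := pvBest_le l (n / 2); omega, pvBest_eq l (n / 2)⟩
        · exact pvBest_le l (n / 2)
        · have := pvBest_le l (n / 2); omega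
      omega
    -- A side
    have hfd : PySem.Int.floordiv (n : Int) 2 = ((n / 2 : Nat) : Int) :=
      PySem.Int.floordiv_natCast n 2
    simp only [hfd, foldA text (n / 2)]
    have hfinal : kmpWalk pi (l.length / 2) (pi.getD (l.length - 1) 0 + 1)
        (pi.getD (l.length - 1) 0) = pvBest l (n / 2) := hweq
    rw [hfinal]
    by_cases hp : 0 < pvBest l (n / 2)
    · rw [if_pos (by exact_mod_cast hp), if_pos hp]
    · rw [if_neg (by exact_mod_cast hp), if_neg hp]
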